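-- pv_equiv track=rewrite | github.com/AkanshaJajodia/Python | findsequencesum.py | getSequenceSum
-- ===== SOURCE A (Python) =====
-- def getSequenceSum(i,j,k):
--     result = 0
--     for a in range (i,j+1):
--         result += a
--         a+1
--     for b in range (k,j):
--         result += b
--
--     return result
-- ===== SOURCE B (Python) =====
-- def getSequenceSum(i, j, k):
--     # closed-form arithmetic-series sums instead of A's two loops
--     def span(lo, hi):
--         # sum of integers lo..hi inclusive, 0 if empty
--         return (lo + hi) * (hi - lo + 1) // 2 if lo <= hi else 0
--     return span(i, j) + span(k, j - 1)
-- ===== Notes on version B (the rewrite author's own statement) =====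
-- stated objective: faster
-- what changed: Replaced the two accumulation loops over range(i,j+1) and range(k,j) with closed-form arithmetic-series formulas.
import Mathlib
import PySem

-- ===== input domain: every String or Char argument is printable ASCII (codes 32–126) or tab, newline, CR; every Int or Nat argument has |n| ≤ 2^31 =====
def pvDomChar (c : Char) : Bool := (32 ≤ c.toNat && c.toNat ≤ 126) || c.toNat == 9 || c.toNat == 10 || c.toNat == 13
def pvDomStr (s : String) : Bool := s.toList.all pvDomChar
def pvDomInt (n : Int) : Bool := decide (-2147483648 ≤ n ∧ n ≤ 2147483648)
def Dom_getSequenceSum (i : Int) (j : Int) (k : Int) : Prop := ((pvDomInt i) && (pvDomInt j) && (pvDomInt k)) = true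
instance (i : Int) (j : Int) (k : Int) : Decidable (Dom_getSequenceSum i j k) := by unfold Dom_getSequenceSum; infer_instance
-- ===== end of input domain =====

-- B replaces A's two accumulation loops with closed-form arithmetic-series sums (asymptotically faster).


-- ===== PORT A =====
-- 'a+1' in the loop body is a no-op expression and ports to nothing.
def getSequenceSum (i : Int) (j : Int) (k : Int) : Int :=
  let result : Int := 0
  let result := (PySem.List.pyRange i (j + 1) 1).foldl (fun result a => result + a) result
  let result := (PySem.List.pyRange k j 1).foldl (fun result b => result + b) result
  result

-- ===== PORT B =====
-- span lo hi = sum of lo..hi inclusive, 0 if empty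
def pvSpan (lo : Int) (hi : Int) : Int :=
  if lo ≤ hi then PySem.Int.floordiv ((lo + hi) * (hi - lo + 1)) 2 else 0

def getSequenceSum_alt (i : Int) (j : Int) (k : Int) : Int :=
  pvSpan i j + pvSpan k (j - 1)

-- ===== PRECONDITION & SPEC =====
def Spec_getSequenceSum (i : Int) (j : Int) (k : Int) (out : Int) : Prop := out = getSequenceSum_alt i j k
instance (i : Int) (j : Int) (k : Int) (out : Int) : Decidable (Spec_getSequenceSum i j k out) := by unfold Spec_getSequenceSum; infer_instance

-- ===== CLAIM (what is proved, stated in full; the proofs are below) =====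
def Claim_equal_getSequenceSum : Prop := ∀ (i : Int) (j : Int) (k : Int), Dom_getSequenceSum i j k → Spec_getSequenceSum i j k (getSequenceSum i j k)

-- ===== LEMMAS AND PROOFS =====

-- (lo+hi)*(hi-lo+1) is even, so the floor division is exact
theorem pvSpan_two_mul (lo hi : Int) (h : lo ≤ hi) :
    2 * pvSpan lo hi = (lo + hi) * (hi - lo + 1) := by
  have heven : ∃ c, (lo + hi) * (hi - lo + 1) = 2 * c := by
    rcases Int.even_mul_succ_self (lo + hi) with ⟨c, hc⟩
    exact ⟨c - lo * (lo + hi), by ring_nf; ring_nf at hc; omega⟩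
  rcases heven with ⟨c, hc⟩
  simp only [pvSpan, if_pos h, hc]
  rw [PySem.Int.floordiv_eq_ediv_of_pos (by norm_num)]
  omega

theorem pvSpan_empty (lo hi : Int) (h : hi < lo) : pvSpan lo hi = 0 := by
  simp [pvSpan, not_le.mpr h]

theorem pvSpan_cons (lo hi : Int) (h : lo ≤ hi) :
    pvSpan lo hi = lo + pvSpan (lo + 1) hi := by
  by_cases h2 : lo + 1 ≤ hi
  · have e1 := pvSpan_two_mul lo hi h
    have e2 := pvSpan_two_mul (lo + 1) hi h2
    have key : (lo + hi) * (hi - lo + 1) = (lo + 1 + hi) * (hi - (lo + 1) + 1) + 2 * lo := by ring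
    omega
  · have hlh : lo = hi := by omega
    have e1 := pvSpan_two_mul lo hi h
    rw [pvSpan_empty (lo + 1) hi (by omega)]
    subst hlh; omega

theorem foldl_add_pyRange (a b : Int) :
    ∀ s : Int, (PySem.List.pyRange a b 1).foldl (fun r x => r + x) s = s + pvSpan a (b - 1) := by
  by_cases hab : b ≤ a
  · intro s
    rw [PySem.List.pyRange_one_eq_nil hab, pvSpan_empty a (b - 1) (by omega)]
    simp
  · have hlt : a < b := by omega
    have : ((b - a).toNat) ≠ 0 := by omega
    intro s
    rw [PySem.List.pyRange_one_cons hlt]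
    simp only [List.foldl_cons]
    rw [foldl_add_pyRange (a + 1) b (s + a), pvSpan_cons a (b - 1) (by omega)]
    ring
termination_by (b - a).toNat
decreasing_by omega

-- ===== VERDICT (by name: the statement is the Claim_ definition above) =====
theorem getSequenceSum_spec : Claim_equal_getSequenceSum := by
  intro i j k _
  unfold Spec_getSequenceSum getSequenceSum getSequenceSum_alt
  simp only [foldl_add_pyRange]
  have : j + 1 - 1 = j := by ring
  rw [this]
  ring
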